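-- pv_equiv track=rewrite | github.com/edgesentry/mpol-analysis | tests/test_ais_csv.py | _encode_bits
-- ===== SOURCE A (Python) =====
-- def _encode_bits(values: list[tuple[int, int]]) -> str:
--     """Pack (value, bit_length) pairs into an NMEA 6-bit ASCII payload."""
--     bits: list[int] = []
--     for v, length in values:
--         for shift in range(length - 1, -1, -1):
--             bits.append((v >> shift) & 1)
--
--     # Pad to multiple of 6
--     while len(bits) % 6:
--         bits.append(0)
--
--     chars = []
--     for i in range(0, len(bits), 6):
--         v = sum(bits[i + j] << (5 - j) for j in range(6))
--         c = v + 48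
--         if c > 87:
--             c += 8
--         chars.append(chr(c))
--     return "".join(chars)
-- ===== SOURCE B (Python) =====
-- def _encode_bits(values: list[tuple[int, int]]) -> str:
--     """Pack (value, bit_length) pairs into an NMEA 6-bit ASCII payload.
--
--     Single integer accumulator instead of a bit list: each value is masked to
--     its bit length and shifted in; 6-bit groups are then extracted from the
--     most significant end and mapped to the NMEA armoring alphabet.
--     """
--     acc = 0
--     total = 0
--     for v, length in values:
--         if length > 0:
--             acc = (acc << length) + (v & ((1 << length) - 1))
--             total += length
--     pad = (-total) % 6
--     acc <<= pad
--     total += pad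
--     chars = []
--     for k in range(total // 6, 0, -1):
--         g = (acc >> (6 * (k - 1))) & 63
--         c = g + 48
--         if c > 87:
--             c += 8
--         chars.append(chr(c))
--     return "".join(chars)
-- ===== Notes on version B (the rewrite author's own statement) =====
-- stated objective: alternative
-- what changed: Replaces the explicit per-bit list (build bits one by one, pad with a while loop, re-read them six at a time by index) with a single integer accumulator: each value is masked and shifted in, padding is one shift, and 6-bit groups are extracted arithmetically from the most significant end.
import Mathlib
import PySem

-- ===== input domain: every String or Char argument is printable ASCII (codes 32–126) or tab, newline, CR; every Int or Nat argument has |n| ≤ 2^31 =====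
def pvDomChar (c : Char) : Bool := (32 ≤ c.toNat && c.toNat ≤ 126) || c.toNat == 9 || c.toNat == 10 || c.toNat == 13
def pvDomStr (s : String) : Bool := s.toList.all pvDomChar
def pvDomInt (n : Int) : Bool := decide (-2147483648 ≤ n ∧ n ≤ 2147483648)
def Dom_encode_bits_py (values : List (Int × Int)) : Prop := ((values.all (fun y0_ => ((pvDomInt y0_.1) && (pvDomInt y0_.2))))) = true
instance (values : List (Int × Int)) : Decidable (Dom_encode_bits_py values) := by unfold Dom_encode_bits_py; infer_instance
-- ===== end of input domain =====

-- B replaces A's explicit bit list (append bit by bit, pad with a while loop, re-read by index in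
-- groups of six) by a single integer accumulator with arithmetic group extraction (objective: alternative).

-- ===== PORT A =====
-- `v >> s` for s ≥ 0 (Python arithmetic right shift = floor division by 2^s; every shift A performs is ≥ 0)
def pvShrA (v s : Int) : Int := PySem.Int.floordiv v (2 ^ s.toNat)
-- `x & 1` (exact for every Python int: x & 1 == x % 2, Python floor mod)
def pvAnd1A (x : Int) : Int := PySem.Int.mod x 2
-- the `while len(bits) % 6: bits.append(0)` loop of A
def pvPadA (bits : List Int) : List Int :=
  if bits.length % 6 = 0 then bits else pvPadA (bits ++ [0])
termination_by (6 - bits.length % 6) % 6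
decreasing_by simp_all [List.length_append]; omega

def encode_bits_py (values : List (Int × Int)) : String :=
  let bits : List Int := values.foldl (fun bits vl =>
    (PySem.List.pyRange (vl.2 - 1) (-1) (-1)).foldl
      (fun bits shift => bits ++ [pvAnd1A (pvShrA vl.1 shift)]) bits) []
  let bits := pvPadA bits
  let chars : List Char := (PySem.List.pyRange 0 (bits.length : Int) 6).foldl (fun chars i =>
    let v := ((PySem.List.pyRange 0 6 1).map
      (fun j => PySem.List.pyGetD bits (i + j) 0 * 2 ^ (5 - j).toNat)).sum
    let c := v + 48
    let c := if c > 87 then c + 8 else c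
    chars ++ [Char.ofNat c.toNat]) []
  String.ofList chars

-- ===== PORT B =====
def encode_bits_py_alt (values : List (Int × Int)) : String :=
  let st := values.foldl (fun (st : Int × Int) vl =>
    if vl.2 > 0 then
      -- `(acc << length) + (v & ((1 << length) - 1))`: left shift = *2^length, power-of-two mask = floor mod (exact, length > 0)
      (st.1 * 2 ^ vl.2.toNat + PySem.Int.mod vl.1 (2 ^ vl.2.toNat), st.2 + vl.2)
    else st) (0, 0)
  let pad := PySem.Int.mod (-st.2) 6
  let acc := st.1 * 2 ^ pad.toNat
  let total := st.2 + pad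
  let chars : List Char := (PySem.List.pyRange (PySem.Int.floordiv total 6) 0 (-1)).foldl (fun chars k =>
    -- `(acc >> (6*(k-1))) & 63`: right shift = floor div by 2^(6*(k-1)), mask 63 = floor mod 64 (exact, k ≥ 1)
    let g := PySem.Int.mod (PySem.Int.floordiv acc (2 ^ (6 * (k - 1)).toNat)) 64
    let c := g + 48
    let c := if c > 87 then c + 8 else c
    chars ++ [Char.ofNat c.toNat]) []
  String.ofList chars

-- ===== PRECONDITION & SPEC =====
def Spec_encode_bits_py (values : List (Int × Int)) (out : String) : Prop := out = encode_bits_py_alt values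
instance (values : List (Int × Int)) (out : String) : Decidable (Spec_encode_bits_py values out) := by unfold Spec_encode_bits_py; infer_instance

-- ===== CLAIM (what is proved, stated in full; the proofs are below) =====
def Claim_equal_encode_bits_py : Prop := ∀ (values : List (Int × Int)), Dom_encode_bits_py values → Spec_encode_bits_py values (encode_bits_py values)

-- ===== LEMMAS AND PROOFS =====

-- value of a big-endian bit list
def pvVal (bs : List Int) : Int := bs.foldl (fun a b => 2 * a + b) 0

-- the `n` low bits of `v`, most significant first
def pvNBits (v : Int) (n : Nat) : List Int :=
  (List.range n).map (fun k => v / 2 ^ (n - 1 - k) % 2)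

def pvBitList (v L : Int) : List Int :=
  (PySem.List.pyRange (L - 1) (-1) (-1)).map (fun s => pvAnd1A (pvShrA v s))

def pvBits (values : List (Int × Int)) : List Int :=
  values.foldl (fun bs vl => bs ++ pvBitList vl.1 vl.2) []

def pvChunks : List Int → List Int
  | b1 :: b2 :: b3 :: b4 :: b5 :: b6 :: rest =>
      (32 * b1 + 16 * b2 + 8 * b3 + 4 * b4 + 2 * b5 + b6) :: pvChunks rest
  | _ => []

def pvIsBits (bs : List Int) : Prop := ∀ b ∈ bs, b = 0 ∨ b = 1

def pvChar (g : Int) : Char :=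
  Char.ofNat (if g + 48 > 87 then g + 48 + 8 else g + 48).toNat

theorem pvVal_foldl (ys : List Int) (a : Int) :
    ys.foldl (fun x b => 2 * x + b) a = a * 2 ^ ys.length + pvVal ys := by
  induction ys generalizing a with
  | nil => simp [pvVal]
  | cons b ys ih =>
      simp only [List.foldl_cons, List.length_cons]
      rw [ih]
      have h2 : pvVal (b :: ys) = b * 2 ^ ys.length + pvVal ys := by
        simpa [pvVal] using ih b
      rw [h2, pow_succ]
      ring

theorem pvVal_append (xs ys : List Int) :
    pvVal (xs ++ ys) = pvVal xs * 2 ^ ys.length + pvVal ys := by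
  simp only [pvVal, List.foldl_append]
  exact pvVal_foldl ys _

theorem pvBitList_nonpos (v L : Int) (hL : L ≤ 0) : pvBitList v L = [] := by
  unfold pvBitList
  rw [PySem.List.pyRange_neg_one_eq_nil (by omega)]
  rfl

theorem pvBitList_eq (v L : Int) (hL : 0 < L) : pvBitList v L = pvNBits v L.toNat := by
  unfold pvBitList pvNBits
  rw [PySem.List.pyRange_neg_one]
  rw [List.map_map]
  have hL' : (L - 1 - -1).toNat = L.toNat := by omega
  rw [hL']
  apply List.map_congr_left
  intro k hk
  simp only [List.mem_range] at hk
  simp only [Function.comp]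
  unfold pvAnd1A pvShrA
  rw [PySem.Int.mod_eq_emod_of_pos (by norm_num),
      PySem.Int.floordiv_eq_ediv_of_pos (by positivity)]
  have he : (L - 1 - (k : Int)).toNat = L.toNat - 1 - k := by omega
  rw [he]

theorem pvNBits_succ (v : Int) (n : Nat) : pvNBits v (n + 1) = pvNBits (v / 2) n ++ [v % 2] := by
  unfold pvNBits
  rw [List.range_succ, List.map_append]
  congr 1
  · apply List.map_congr_left
    intro k hk
    simp only [List.mem_range] at hk
    have h1 : n + 1 - 1 - k = (n - 1 - k) + 1 := by omega
    rw [h1, pow_succ', ← Int.ediv_ediv_of_nonneg (show (0:Int) ≤ 2 by norm_num)]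
  · simp

theorem pvNBits_val (v : Int) (n : Nat) : pvVal (pvNBits v n) = v % 2 ^ n := by
  induction n generalizing v with
  | zero => simp [pvNBits, pvVal]
  | succ n ih =>
      rw [pvNBits_succ, pvVal_append, ih]
      have hP : (0:Int) < 2 ^ n := by positivity
      have h1 := Int.ediv_add_emod v 2
      have h2 := Int.ediv_add_emod (v / 2) (2 ^ n)
      have hr0 : 0 ≤ v % 2 := Int.emod_nonneg _ (by norm_num)
      have hr2 : v % 2 < 2 := Int.emod_lt_of_pos _ (by norm_num)
      have hq0 : 0 ≤ v / 2 % 2 ^ n := Int.emod_nonneg _ (by positivity)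
      have hq2 : v / 2 % 2 ^ n < 2 ^ n := Int.emod_lt_of_pos _ hP
      have key : v = (2 * (v / 2 % 2 ^ n) + v % 2) + 2 ^ (n + 1) * (v / 2 / 2 ^ n) := by
        rw [pow_succ]; linarith
      have h0 : 0 ≤ 2 * (v / 2 % 2 ^ n) + v % 2 := by linarith
      have hlt : 2 * (v / 2 % 2 ^ n) + v % 2 < 2 ^ (n + 1) := by rw [pow_succ]; linarith
      conv_rhs => rw [key]
      rw [Int.add_mul_emod_self_left, Int.emod_eq_of_lt h0 hlt]
      simp [pvVal]
      ring

theorem pvNBits_isBits (v : Int) (n : Nat) : pvIsBits (pvNBits v n) := by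
  intro b hb
  simp only [pvNBits, List.mem_map, List.mem_range] at hb
  obtain ⟨k, -, rfl⟩ := hb
  omega

theorem pvBits_isBits (values : List (Int × Int)) : pvIsBits (pvBits values) := by
  have gen : ∀ (vs : List (Int × Int)) (bs0 : List Int), pvIsBits bs0 →
      pvIsBits (vs.foldl (fun bs vl => bs ++ pvBitList vl.1 vl.2) bs0) := by
    intro vs
    induction vs with
    | nil => intro bs0 h; exact h
    | cons p t ih =>
        intro bs0 h
        simp only [List.foldl_cons]
        apply ih
        intro b hb
        rcases List.mem_append.mp hb with hb | hb
        · exact h b hb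
        · by_cases hL : 0 < p.2
          · rw [pvBitList_eq _ _ hL] at hb
            exact pvNBits_isBits _ _ b hb
          · rw [pvBitList_nonpos _ _ (by omega)] at hb
            simp at hb
  exact gen values [] (by intro b hb; simp at hb)

theorem pvVal_bound (bs : List Int) (h : pvIsBits bs) :
    0 ≤ pvVal bs ∧ pvVal bs < 2 ^ bs.length := by
  induction bs with
  | nil => simp [pvVal]
  | cons b l ih =>
      have hbl : pvIsBits l := fun x hx => h x (List.mem_cons_of_mem _ hx)
      have hb : b = 0 ∨ b = 1 := h b List.mem_cons_self
      obtain ⟨h0, h1⟩ := ih hbl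
      have hval : pvVal (b :: l) = b * 2 ^ l.length + pvVal l := by
        simpa [pvVal] using pvVal_foldl l b
      have hP : (0:Int) < 2 ^ l.length := by positivity
      rw [hval]
      constructor
      · rcases hb with rfl | rfl <;> linarith
      · rw [List.length_cons, pow_succ]
        rcases hb with rfl | rfl <;> linarith

theorem pvPadA_eq (bs : List Int) :
    pvPadA bs = bs ++ List.replicate ((6 - bs.length % 6) % 6) 0 := by
  fun_induction pvPadA bs with
  | case1 bs h =>
      have : (6 - bs.length % 6) % 6 = 0 := by omega
      simp [this]
  | case2 bs h ih =>
      rw [ih, List.append_assoc]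
      congr 1
      have hl : (6 - (bs ++ [0]).length % 6) % 6 + 1 = (6 - bs.length % 6) % 6 := by
        simp [List.length_append]; omega
      rw [← hl, List.singleton_append, ← List.replicate_succ]

theorem pvVal_replicate_zero (p : Nat) : pvVal (List.replicate p 0) = 0 := by
  induction p with
  | zero => simp [pvVal]
  | succ p ih => simpa [pvVal, List.replicate_succ, List.foldl_cons] using ih

-- the state of B's fold is (value, length) of the bit list A has built so far
theorem pvFold_state (values : List (Int × Int)) (bs0 : List Int) :
    values.foldl (fun (st : Int × Int) vl =>
      if vl.2 > 0 then
        (st.1 * 2 ^ vl.2.toNat + PySem.Int.mod vl.1 (2 ^ vl.2.toNat), st.2 + vl.2)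
      else st) (pvVal bs0, (bs0.length : Int)) =
    (pvVal (values.foldl (fun bs vl => bs ++ pvBitList vl.1 vl.2) bs0),
     ((values.foldl (fun bs vl => bs ++ pvBitList vl.1 vl.2) bs0).length : Int)) := by
  induction values generalizing bs0 with
  | nil => simp
  | cons p t ih =>
      simp only [List.foldl_cons]
      by_cases hL : p.2 > 0
      · rw [if_pos hL]
        have hbl : pvBitList p.1 p.2 = pvNBits p.1 p.2.toNat := pvBitList_eq _ _ hL
        have hlen : (pvBitList p.1 p.2).length = p.2.toNat := by simp [hbl, pvNBits]
        have h1 : pvVal bs0 * 2 ^ p.2.toNat + PySem.Int.mod p.1 (2 ^ p.2.toNat) =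
            pvVal (bs0 ++ pvBitList p.1 p.2) := by
          rw [pvVal_append, hlen, hbl, pvNBits_val,
              PySem.Int.mod_eq_emod_of_pos (by positivity)]
        have h2 : (bs0.length : Int) + p.2 = ((bs0 ++ pvBitList p.1 p.2).length : Int) := by
          rw [List.length_append, hlen]; omega
        rw [h1, h2]
        exact ih (bs0 ++ pvBitList p.1 p.2)
      · rw [if_neg hL]
        have : pvBitList p.1 p.2 = [] := pvBitList_nonpos _ _ (by omega)
        rw [this, List.append_nil] at *
        simpa [this] using ih bs0

theorem pvGetD6 (b1 b2 b3 b4 b5 b6 : Int) (rest : List Int) (n : Nat) (d : Int) :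
    (b1 :: b2 :: b3 :: b4 :: b5 :: b6 :: rest).getD (n + 6) d = rest.getD n d := by
  conv_rhs => rw [show rest = (b1 :: b2 :: b3 :: b4 :: b5 :: b6 :: rest).drop 6 from rfl]
  rw [List.getD_eq_getElem?_getD, List.getD_eq_getElem?_getD, List.getElem?_drop, Nat.add_comm]

theorem pvRange06 : PySem.List.pyRange 0 6 1 = [0, 1, 2, 3, 4, 5] := by decide

-- A's group loop reads exactly the 6-bit chunks
theorem pvGroupsA (m : Nat) (bits : List Int) (h : bits.length = 6 * m) :
    (List.range m).map (fun (k : Nat) =>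
      ((PySem.List.pyRange 0 6 1).map
        (fun j => PySem.List.pyGetD bits ((6 * (k : Int)) + j) 0 * 2 ^ (5 - j).toNat)).sum) =
    pvChunks bits := by
  induction m generalizing bits with
  | zero =>
      have : bits = [] := List.length_eq_zero_iff.mp (by omega)
      subst this
      simp [pvChunks]
  | succ m ih =>
      match bits, h with
      | b1 :: b2 :: b3 :: b4 :: b5 :: b6 :: rest, h =>
        have hr : rest.length = 6 * m := by simp at h; omega
        rw [List.range_succ_eq_map, List.map_cons, List.map_map]
        show _ :: _ = pvChunks (b1 :: b2 :: b3 :: b4 :: b5 :: b6 :: rest)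
        rw [pvChunks]
        congr 1
        · rw [pvRange06]
          simp only [List.map_cons, List.map_nil, List.sum_cons, List.sum_nil]
          norm_num [PySem.List.pyGetD_ofNat', List.getD]
          simp only [show ((5:Int)).toNat = 5 from rfl, show ((4:Int)).toNat = 4 from rfl,
            show ((3:Int)).toNat = 3 from rfl, show ((2:Int)).toNat = 2 from rfl]
          ring
        · rw [← ih rest hr]
          apply List.map_congr_left
          intro k hk
          simp only [Function.comp_apply]
          rw [pvRange06]
          simp only [List.map_cons, List.map_nil, List.sum_cons, List.sum_nil]
          have e0 : ((6:Int) * ((Nat.succ k : Nat):Int) + 0) = ((6 * k + 0 + 6 : Nat):Int) := by push_cast; ring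
          have e1 : ((6:Int) * ((Nat.succ k : Nat):Int) + 1) = ((6 * k + 1 + 6 : Nat):Int) := by push_cast; ring
          have e2 : ((6:Int) * ((Nat.succ k : Nat):Int) + 2) = ((6 * k + 2 + 6 : Nat):Int) := by push_cast; ring
          have e3 : ((6:Int) * ((Nat.succ k : Nat):Int) + 3) = ((6 * k + 3 + 6 : Nat):Int) := by push_cast; ring
          have e4 : ((6:Int) * ((Nat.succ k : Nat):Int) + 4) = ((6 * k + 4 + 6 : Nat):Int) := by push_cast; ring
          have e5 : ((6:Int) * ((Nat.succ k : Nat):Int) + 5) = ((6 * k + 5 + 6 : Nat):Int) := by push_cast; ring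
          have f0 : ((6:Int) * ((k : Nat):Int) + 0) = ((6 * k + 0 : Nat):Int) := by push_cast; ring
          have f1 : ((6:Int) * ((k : Nat):Int) + 1) = ((6 * k + 1 : Nat):Int) := by push_cast; ring
          have f2 : ((6:Int) * ((k : Nat):Int) + 2) = ((6 * k + 2 : Nat):Int) := by push_cast; ring
          have f3 : ((6:Int) * ((k : Nat):Int) + 3) = ((6 * k + 3 : Nat):Int) := by push_cast; ring
          have f4 : ((6:Int) * ((k : Nat):Int) + 4) = ((6 * k + 4 : Nat):Int) := by push_cast; ring
          have f5 : ((6:Int) * ((k : Nat):Int) + 5) = ((6 * k + 5 : Nat):Int) := by push_cast; ring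
          rw [e0, e1, e2, e3, e4, e5, f0, f1, f2, f3, f4, f5]
          simp only [PySem.List.pyGetD_natCast, pvGetD6]
          simp

-- B's arithmetic extraction produces the same chunks
theorem pvGroupsB (m : Nat) (bits : List Int) (h : bits.length = 6 * m) (hb : pvIsBits bits) :
    (List.range m).map (fun (k : Nat) =>
      pvVal bits / 2 ^ (6 * ((m : Int) - (k : Int) - 1)).toNat % 64) =
    pvChunks bits := by
  induction m generalizing bits with
  | zero =>
      have : bits = [] := List.length_eq_zero_iff.mp (by omega)
      subst this
      simp [pvChunks]
  | succ m ih =>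
      match bits, h, hb with
      | b1 :: b2 :: b3 :: b4 :: b5 :: b6 :: rest, h, hb =>
        have hr : rest.length = 6 * m := by simp at h; omega
        have hbrest : pvIsBits rest := by
          intro b hbm; exact hb b (by simp [hbm])
        have hb1 := hb b1 (by simp)
        have hb2 := hb b2 (by simp)
        have hb3 := hb b3 (by simp)
        have hb4 := hb b4 (by simp)
        have hb5 := hb b5 (by simp)
        have hb6 := hb b6 (by simp)
        set hd : Int := 32 * b1 + 16 * b2 + 8 * b3 + 4 * b4 + 2 * b5 + b6 with hhd
        have hval : pvVal (b1 :: b2 :: b3 :: b4 :: b5 :: b6 :: rest) =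
            pvVal rest + hd * 2 ^ (6 * m) := by
          rw [show (b1 :: b2 :: b3 :: b4 :: b5 :: b6 :: rest) =
                [b1, b2, b3, b4, b5, b6] ++ rest from rfl, pvVal_append, hr]
          have : pvVal [b1, b2, b3, b4, b5, b6] = hd := by
            simp [pvVal, hhd]; ring
          rw [this]; ring
        obtain ⟨hv0, hv1⟩ := pvVal_bound rest hbrest
        rw [hr] at hv1
        rw [List.range_succ_eq_map, List.map_cons, List.map_map]
        show _ :: _ = pvChunks (b1 :: b2 :: b3 :: b4 :: b5 :: b6 :: rest)
        rw [pvChunks]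
        congr 1
        · -- head chunk
          have he : (6 * (((m + 1 : Nat) : Int) - ((0 : Nat) : Int) - 1)).toNat = 6 * m := by
            push_cast; omega
          rw [hval, he, Int.add_mul_ediv_right _ _ (by positivity),
              Int.ediv_eq_zero_of_lt hv0 hv1]
          have hhd0 : 0 ≤ hd := by rcases hb1 with rfl|rfl <;> rcases hb2 with rfl|rfl <;>
            rcases hb3 with rfl|rfl <;> rcases hb4 with rfl|rfl <;>
            rcases hb5 with rfl|rfl <;> rcases hb6 with rfl|rfl <;> norm_num [hhd]
          have hhd64 : hd < 64 := by rcases hb1 with rfl|rfl <;> rcases hb2 with rfl|rfl <;>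
            rcases hb3 with rfl|rfl <;> rcases hb4 with rfl|rfl <;>
            rcases hb5 with rfl|rfl <;> rcases hb6 with rfl|rfl <;> norm_num [hhd]
          rw [zero_add, Int.emod_eq_of_lt hhd0 hhd64]
        · rw [← ih rest hr hbrest]
          apply List.map_congr_left
          intro k hk
          simp only [List.mem_range] at hk
          simp only [Function.comp_apply]
          have he : (6 * (((m + 1 : Nat) : Int) - ((Nat.succ k : Nat) : Int) - 1)).toNat
              = 6 * (m - 1 - k) := by push_cast; omega
          have he2 : (6 * (((m : Nat) : Int) - ((k : Nat) : Int) - 1)).toNat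
              = 6 * (m - 1 - k) := by omega
          rw [he, he2, hval]
          have hsplit : (2:Int) ^ (6 * m) = 64 * 2 ^ (6 * m - 6 * (m - 1 - k) - 6) * 2 ^ (6 * (m - 1 - k)) := by
            rw [show (64:Int) = 2 ^ 6 from rfl, ← pow_add, ← pow_add]
            congr 1
            omega
          rw [hsplit, ← mul_assoc, Int.add_mul_ediv_right _ _ (by positivity)]
          have : hd * (64 * 2 ^ (6 * m - 6 * (m - 1 - k) - 6)) =
              64 * (hd * 2 ^ (6 * m - 6 * (m - 1 - k) - 6)) := by ring
          rw [this, Int.add_mul_emod_self_left]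

-- ===== VERDICT (by name: the statement is the Claim_ definition above) =====
theorem pvFD2 (a : Int) (e : Nat) : PySem.Int.floordiv a (2 ^ e) = a / 2 ^ e :=
  PySem.Int.floordiv_eq_ediv_of_pos (by positivity)

theorem pvMod64 (a : Int) : PySem.Int.mod a 64 = a % 64 :=
  PySem.Int.mod_eq_emod_of_pos (by norm_num)

theorem encode_bits_py_spec : Claim_equal_encode_bits_py := by
  unfold Claim_equal_encode_bits_py
  intro values _
  unfold Spec_encode_bits_py
  have hA : (values.foldl (fun bits vl =>
      (PySem.List.pyRange (vl.2 - 1) (-1) (-1)).foldl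
        (fun bits shift => bits ++ [pvAnd1A (pvShrA vl.1 shift)]) bits) []) = pvBits values := by
    unfold pvBits
    congr 1
    funext bits vl
    rw [PySem.List.foldl_append_singleton_eq_map]
    rfl
  have hB : (values.foldl (fun (st : Int × Int) vl =>
      if vl.2 > 0 then
        (st.1 * 2 ^ vl.2.toNat + PySem.Int.mod vl.1 (2 ^ vl.2.toNat), st.2 + vl.2)
      else st) (0, 0)) = (pvVal (pvBits values), ((pvBits values).length : Int)) := by
    have := pvFold_state values []
    simpa [pvVal, pvBits] using this
  simp only [encode_bits_py, encode_bits_py_alt, hA, hB]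
  set bs := pvBits values with hbs
  set p : Nat := (6 - bs.length % 6) % 6 with hp
  have hp6 : (bs.length + p) % 6 = 0 := by omega
  have hpad : PySem.Int.mod (-(bs.length : Int)) 6 = (p : Int) := by
    rw [PySem.Int.mod_eq_emod_of_pos (by norm_num)]
    omega
  have hlen : (pvPadA bs).length = bs.length + p := by
    rw [pvPadA_eq, List.length_append, List.length_replicate]
  have hval : pvVal (pvPadA bs) = pvVal bs * 2 ^ p := by
    rw [pvPadA_eq, pvVal_append, pvVal_replicate_zero, List.length_replicate, add_zero]
  set m : Nat := (bs.length + p) / 6 with hm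
  have hm6 : (pvPadA bs).length = 6 * m := by omega
  have hbp : pvIsBits (pvPadA bs) := by
    rw [pvPadA_eq]
    intro b hb
    rcases List.mem_append.mp hb with hb | hb
    · exact pvBits_isBits values b hb
    · left; exact List.eq_of_mem_replicate hb
  -- A side: loop-to-map, range with step 6
  rw [PySem.List.foldl_append_singleton_eq_map]
  have hrangeA : PySem.List.pyRange 0 ((pvPadA bs).length : Int) 6 =
      (List.range m).map (fun (k : Nat) => ((6 * k : Nat) : Int)) := by
    rw [PySem.List.pyRange_of_pos _ _ (by norm_num)]
    rw [hm6]
    rcases Nat.eq_zero_or_pos m with hm0 | hm0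
    · simp [hm0]
    · rw [if_pos (by push_cast; omega)]
      have : (((6 * m : Nat) : Int) - 0 + 6 - 1) / 6 = (m : Int) := by push_cast; omega
      rw [this]
      simp
  rw [hrangeA, List.map_map]
  -- B side: loop-to-map, countdown range
  rw [PySem.List.foldl_append_singleton_eq_map]
  have hfd : PySem.Int.floordiv ((bs.length : Int) + PySem.Int.mod (-(bs.length : Int)) 6) 6 = (m : Int) := by
    rw [hpad, PySem.Int.floordiv_eq_ediv_of_pos (by norm_num)]
    omega
  rw [hfd]
  have hrangeB : PySem.List.pyRange (m : Int) 0 (-1) =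
      (List.range m).map (fun (k : Nat) => (m : Int) - (k : Int)) := by
    rw [PySem.List.pyRange_neg_one]
    norm_num
  rw [hrangeB, List.map_map]
  congr 1
  rw [hpad]
  simp only [Int.toNat_natCast, pvFD2, pvMod64]
  rw [← hval]
  simp only [List.nil_append]
  calc _ = List.map pvChar (pvChunks (pvPadA bs)) := by
            rw [← pvGroupsA m (pvPadA bs) hm6, List.map_map]
            apply List.map_congr_left
            intro k hk
            simp only [Function.comp_apply]
            have hc : ((6 * k : Nat) : Int) = 6 * (k : Int) := by push_cast; ring
            rw [hc]
            rfl
       _ = _ := by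
            rw [← pvGroupsB m (pvPadA bs) hm6 hbp, List.map_map]
            apply List.map_congr_left
            intro k hk
            rfl
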